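-- pv_equiv track=rewrite | github.com/paiml/forjar | split_files.py | brace_depth_change
-- ===== SOURCE A (Python) =====
-- def brace_depth_change(line):
--     """Net brace depth change, skipping strings and line comments."""
--     d = 0
--     in_str = False
--     i = 0
--     while i < len(line):
--         c = line[i]
--         if in_str:
--             if c == '\\':
--                 i += 1
--             elif c == '"':
--                 in_str = False
--         else:
--             if c == '"':
--                 in_str = True
--             elif c == '{':
--                 d += 1
--             elif c == '}':
--                 d -= 1
--             elif c == '/' and i + 1 < len(line) and line[i + 1] == '/':
--                 break
--         i += 1
--     return d
-- ===== SOURCE B (Python) =====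
-- def brace_depth_change(line):
--     """Net brace depth change, skipping strings and line comments.
--     Single-pass DFA over characters: states CODE / SLASH (pending '/') /
--     STR (inside string) / ESC (after backslash in string)."""
--     CODE, SLASH, STR, ESC = range(4)
--     d = 0
--     st = CODE
--     for c in line:
--         if st == ESC:
--             st = STR
--         elif st == STR:
--             if c == '\\':
--                 st = ESC
--             elif c == '"':
--                 st = CODE
--         elif st == SLASH:
--             if c == '/':
--                 return d
--             st = CODE
--             if c == '"':
--                 st = STR
--             elif c == '{':
--                 d += 1
--             elif c == '}':
--                 d -= 1
--         else:
--             if c == '"':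
--                 st = STR
--             elif c == '{':
--                 d += 1
--             elif c == '}':
--                 d -= 1
--             elif c == '/':
--                 st = SLASH
--     return d
-- ===== Notes on version B (the rewrite author's own statement) =====
-- stated objective: alternative
-- what changed: Replaced A's index-based while loop with an in_str flag, a one-character lookahead for the comment starter and an in-loop index skip for escapes by a single-pass four-state DFA (code / pending-slash / string / escape) folded over the characters with no indexing or lookahead.
import Mathlib
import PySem

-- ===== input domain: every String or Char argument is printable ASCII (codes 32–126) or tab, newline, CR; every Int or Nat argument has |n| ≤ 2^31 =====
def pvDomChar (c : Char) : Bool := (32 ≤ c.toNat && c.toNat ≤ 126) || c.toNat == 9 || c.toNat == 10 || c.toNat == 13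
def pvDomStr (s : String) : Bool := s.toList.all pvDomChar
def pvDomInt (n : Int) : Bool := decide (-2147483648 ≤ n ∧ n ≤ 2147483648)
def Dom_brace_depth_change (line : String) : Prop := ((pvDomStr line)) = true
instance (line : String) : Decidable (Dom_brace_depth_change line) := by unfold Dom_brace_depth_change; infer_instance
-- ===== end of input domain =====

-- B replaces A's index loop with lookahead/skip by a single-pass 4-state DFA fold; objective: alternative/idiomatic, same O(n) cost.

-- ===== PORT A =====
-- A's while loop over index i, state (d, in_str); 'i += 1' inside the escape
-- branch consumes an extra character, the comment test looks one char ahead.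
def braceLoopA : List Char → Int → Bool → Int
  | [], d, _ => d
  | c :: rest, d, true =>
      if c = '\\' then
        -- skip the escaped character (i += 1 twice)
        match rest with
        | [] => d
        | _ :: rs => braceLoopA rs d true
      else if c = '"' then braceLoopA rest d false
      else braceLoopA rest d true
  | c :: rest, d, false =>
      if c = '"' then braceLoopA rest d true
      else if c = '{' then braceLoopA rest (d + 1) false
      else if c = '}' then braceLoopA rest (d - 1) false
      else if c = '/' ∧ rest.head? = some '/' then d   -- break
      else braceLoopA rest d false

def brace_depth_change (line : String) : Int :=
  braceLoopA line.toList 0 false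

-- ===== PORT B =====
inductive BMode where
  | code | slash | str | esc | done
deriving DecidableEq, Repr

def braceStepB : Int × BMode → Char → Int × BMode
  | (d, .done), _ => (d, .done)
  | (d, .esc), _ => (d, .str)
  | (d, .str), c =>
      if c = '\\' then (d, .esc)
      else if c = '"' then (d, .code)
      else (d, .str)
  | (d, .slash), c =>
      if c = '/' then (d, .done)            -- 'return d'
      else if c = '"' then (d, .str)
      else if c = '{' then (d + 1, .code)
      else if c = '}' then (d - 1, .code)
      else (d, .code)
  | (d, .code), c =>
      if c = '"' then (d, .str)
      else if c = '{' then (d + 1, .code)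
      else if c = '}' then (d - 1, .code)
      else if c = '/' then (d, .slash)
      else (d, .code)

def brace_depth_change_alt (line : String) : Int :=
  (line.toList.foldl braceStepB (0, .code)).1

-- ===== PRECONDITION & SPEC =====
def Spec_brace_depth_change (line : String) (out : Int) : Prop := out = brace_depth_change_alt line
instance (line : String) (out : Int) : Decidable (Spec_brace_depth_change line out) := by unfold Spec_brace_depth_change; infer_instance

-- ===== CLAIM (what is proved, stated in full; the proofs are below) =====
def Claim_equal_brace_depth_change : Prop := ∀ (line : String), Dom_brace_depth_change line → Spec_brace_depth_change line (brace_depth_change line)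

-- ===== LEMMAS AND PROOFS =====

lemma fold_done (cs : List Char) (d : Int) :
    (cs.foldl braceStepB (d, BMode.done)).1 = d := by
  induction cs with
  | nil => rfl
  | cons c cs ih => simpa [braceStepB] using ih

lemma braceLoop_main : ∀ (n : ℕ) (cs : List Char), cs.length ≤ n → ∀ d : Int,
    braceLoopA cs d false = (cs.foldl braceStepB (d, BMode.code)).1 ∧
    braceLoopA cs d true = (cs.foldl braceStepB (d, BMode.str)).1 := by
  intro n
  induction n with
  | zero =>
    intro cs h d
    have : cs = [] := List.eq_nil_of_length_eq_zero (Nat.le_zero.mp h)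
    subst this; exact ⟨rfl, rfl⟩
  | succ n ih =>
    intro cs h d
    cases cs with
    | nil => exact ⟨rfl, rfl⟩
    | cons c rest =>
      have hr : rest.length ≤ n := by simpa using Nat.succ_le_succ_iff.mp h
      constructor
      · -- code state
        by_cases h1 : c = '"'
        · simp [braceLoopA, braceStepB, h1, (ih rest hr d).2]
        · by_cases h2 : c = '{'
          · simp [braceLoopA, braceStepB, h2, (ih rest hr (d+1)).1]
          · by_cases h3 : c = '}'
            · simp [braceLoopA, braceStepB, h3, (ih rest hr (d-1)).1]
            · by_cases h4 : c = '/'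
              · -- lookahead
                cases rest with
                | nil => simp [braceLoopA, braceStepB, h4]
                | cons c2 rs =>
                  have hrs : rs.length ≤ n := by
                    simp only [List.length_cons] at hr; omega
                  by_cases h5 : c2 = '/'
                  · simp [braceLoopA, braceStepB, h4, h5, fold_done]
                  · -- A continues at c2 in code state; B is in slash state
                    have hA : braceLoopA (c :: c2 :: rs) d false
                        = braceLoopA (c2 :: rs) d false := by
                      simp [braceLoopA, h4, h5]
                    rw [hA, (ih (c2 :: rs) hr d).1]
                    simp [braceStepB, h4, h5]
              · simp [braceLoopA, braceStepB, h1, h2, h3, h4, (ih rest hr d).1]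
      · -- string state
        by_cases h1 : c = '\\'
        · cases rest with
          | nil => simp [braceLoopA, braceStepB, h1]
          | cons c2 rs =>
            have hrs : rs.length ≤ n := by
              simp only [List.length_cons] at hr; omega
            simp [braceLoopA, braceStepB, h1, (ih rs hrs d).2]
        · rw [braceLoopA.eq_def]
          by_cases h2 : c = '"'
          · simp [braceStepB, h2, (ih rest hr d).1]
          · simp [braceStepB, h1, h2, (ih rest hr d).2]

-- ===== VERDICT (by name: the statement is the Claim_ definition above) =====
theorem brace_depth_change_spec : Claim_equal_brace_depth_change := by
  intro line _
  unfold Spec_brace_depth_change brace_depth_change brace_depth_change_alt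
  exact (braceLoop_main line.toList.length line.toList le_rfl 0).1
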